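-- pv_equiv track=rewrite | github.com/abhinavabcd/blaster | blaster/server.py | get_chunk_size_from_header
-- ===== SOURCE A (Python) =====
-- def get_chunk_size_from_header(chunk_header):
-- 	ret = 0
-- 	i = 0
-- 	chunk_header_len = len(chunk_header)
-- 	A = ord('A')
-- 	Z = ord('Z')
-- 	_0 = ord('0')
-- 	_9 = ord('9')
-- 	while(i < chunk_header_len):
-- 		c = ord(chunk_header[i])
-- 		if(c >= A and c <= Z):
-- 			ret = ret * 16 + (10 + c - A)
-- 		elif(c >= _0 and c <= _9):
-- 			ret = ret * 16 + (c - _0)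
-- 		else:
-- 			return ret
-- 		i += 1
-- 	return ret
-- ===== SOURCE B (Python) =====
-- def _pv_hexval(c):
-- 	o = ord(c)
-- 	return o - 55 if o >= 65 else o - 48
--
-- def get_chunk_size_from_header(chunk_header):
-- 	# stage 1: find the boundary of the valid prefix
-- 	k = len(chunk_header)
-- 	for i, c in enumerate(chunk_header):
-- 		if not ('0' <= c <= '9' or 'A' <= c <= 'Z'):
-- 			k = i
-- 			break
-- 	# stage 2: positional sum, each digit shifted by 4 bits per place from the right
-- 	return sum(_pv_hexval(c) << (4 * (k - 1 - i)) for i, c in enumerate(chunk_header[:k]))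
-- ===== Notes on version B (the rewrite author's own statement) =====
-- stated objective: alternative
-- what changed: B works in two stages: it first finds the boundary of the valid [0-9A-Z] prefix, then computes the value as a positional sum of digit values bit-shifted by 4*(places from the right), instead of A's single index loop carrying a Horner accumulator with an early return.
import Mathlib
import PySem

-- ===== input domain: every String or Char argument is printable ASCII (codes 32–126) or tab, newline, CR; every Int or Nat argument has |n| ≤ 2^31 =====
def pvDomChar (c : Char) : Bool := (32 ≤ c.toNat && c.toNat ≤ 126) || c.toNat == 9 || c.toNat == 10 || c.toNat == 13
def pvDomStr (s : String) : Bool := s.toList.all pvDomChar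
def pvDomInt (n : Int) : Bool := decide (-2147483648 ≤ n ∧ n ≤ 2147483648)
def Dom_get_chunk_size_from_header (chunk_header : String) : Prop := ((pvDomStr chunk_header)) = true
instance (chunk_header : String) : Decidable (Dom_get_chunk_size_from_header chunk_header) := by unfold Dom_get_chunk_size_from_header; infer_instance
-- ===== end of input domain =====

-- B finds the valid-prefix boundary first, then combines digits as a positional shifted sum instead of A's single Horner-accumulator loop; same cost, different algorithmic decomposition.


-- ===== PORT A =====
-- A's while loop over index i, carrying ret; early return on the first invalid character
def pvLoopA : List Char → Int → Int
  | [], ret => ret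
  | c :: rest, ret =>
    let cc : Int := (c.toNat : Int)
    if 65 ≤ cc ∧ cc ≤ 90 then pvLoopA rest (ret * 16 + (10 + cc - 65))
    else if 48 ≤ cc ∧ cc ≤ 57 then pvLoopA rest (ret * 16 + (cc - 48))
    else ret

def get_chunk_size_from_header (chunk_header : String) : Int :=
  pvLoopA chunk_header.toList 0

-- ===== PORT B =====
-- Source B's _pv_hexval: o - 55 if o >= 65 else o - 48 (comparisons on code points, exact for ASCII)
def pvHexVal (c : Char) : Int :=
  if 65 ≤ c.toNat then (c.toNat : Int) - 55 else (c.toNat : Int) - 48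

-- Source B's character test '0' <= c <= '9' or 'A' <= c <= 'Z'
def pvOkB (c : Char) : Bool :=
  (48 ≤ c.toNat && c.toNat ≤ 57) || (65 ≤ c.toNat && c.toNat ≤ 90)

-- stage 1 of Source B: the enumerate loop that breaks with k = i at the first invalid
-- character; falling off the end leaves k = len(chunk_header), i.e. the final i
def pvFindK : Nat → List Char → Nat
  | i, [] => i
  | i, c :: rest => if pvOkB c then pvFindK (i + 1) rest else i

-- stage 2 of Source B: sum over enumerate(chunk_header[:k]) of hexval << 4*(k-1-i);
-- x << n on a nonnegative int is exactly x * 2^n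
def get_chunk_size_from_header_alt (chunk_header : String) : Int :=
  let k := pvFindK 0 chunk_header.toList
  ((chunk_header.toList.take k).zipIdx).foldl
    (fun acc ci => acc + pvHexVal ci.1 * (2 : Int) ^ (4 * (k - 1 - ci.2))) 0

-- ===== PRECONDITION & SPEC =====
def Spec_get_chunk_size_from_header (chunk_header : String) (out : Int) : Prop := out = get_chunk_size_from_header_alt chunk_header
instance (chunk_header : String) (out : Int) : Decidable (Spec_get_chunk_size_from_header chunk_header out) := by unfold Spec_get_chunk_size_from_header; infer_instance

-- ===== CLAIM (what is proved, stated in full; the proofs are below) =====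
def Claim_equal_get_chunk_size_from_header : Prop := ∀ (chunk_header : String), Dom_get_chunk_size_from_header chunk_header → Spec_get_chunk_size_from_header chunk_header (get_chunk_size_from_header chunk_header)

-- ===== LEMMAS AND PROOFS =====

-- reference: Horner fold with pvHexVal
def pvHorner (l : List Char) (a : Int) : Int :=
  l.foldl (fun r c => r * 16 + pvHexVal c) a

theorem pvLoopA_eq (l : List Char) : ∀ ret : Int,
    pvLoopA l ret = pvHorner (l.takeWhile pvOkB) ret := by
  induction l with
  | nil => intro ret; simp [pvLoopA, pvHorner]
  | cons c rest ih =>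
    intro ret
    by_cases hU : 65 ≤ (c.toNat : Int) ∧ (c.toNat : Int) ≤ 90
    · have hN : 65 ≤ c.toNat ∧ c.toNat ≤ 90 := by exact_mod_cast hU
      have hok : pvOkB c = true := by simp [pvOkB]; omega
      have hv : pvHexVal c = (c.toNat : Int) - 55 := by simp [pvHexVal, hN.1]
      have : (10 : Int) + (c.toNat : Int) - 65 = pvHexVal c := by rw [hv]; ring
      simp [pvLoopA, hU, List.takeWhile, hok, ih, pvHorner, this]
    · by_cases hD : 48 ≤ (c.toNat : Int) ∧ (c.toNat : Int) ≤ 57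
      · have hN : 48 ≤ c.toNat ∧ c.toNat ≤ 57 := by exact_mod_cast hD
        have hN2 : ¬ 65 ≤ c.toNat := by omega
        have hok : pvOkB c = true := by simp [pvOkB]; omega
        have hv : pvHexVal c = (c.toNat : Int) - 48 := by simp [pvHexVal, hN2]
        simp [pvLoopA, hD, List.takeWhile, hok, ih, pvHorner, hv]
        intro h
        exact absurd h hN2
      · have hok : pvOkB c = false := by
          simp [pvOkB]
          omega
        have e : pvLoopA (c :: rest) ret = ret := by
          show (if _ ∧ _ then _ else if _ ∧ _ then _ else ret) = ret
          rw [if_neg hU, if_neg hD]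
        rw [e]
        simp [List.takeWhile, hok, pvHorner]

theorem pvFindK_eq (l : List Char) : ∀ i : Nat,
    pvFindK i l = i + (l.takeWhile pvOkB).length := by
  induction l with
  | nil => intro i; simp [pvFindK]
  | cons c rest ih =>
    intro i
    by_cases h : pvOkB c = true
    · simp [pvFindK, h, List.takeWhile, ih]; omega
    · simp [pvFindK, h, List.takeWhile]

theorem pvHorner_lin (l : List Char) : ∀ a : Int,
    pvHorner l a = a * 16 ^ l.length + pvHorner l 0 := by
  induction l with
  | nil => intro a; simp [pvHorner]
  | cons c rest ih =>
    intro a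
    show pvHorner rest (a * 16 + pvHexVal c) = _
    rw [ih (a * 16 + pvHexVal c)]
    have : pvHorner (c :: rest) 0 = pvHorner rest (0 * 16 + pvHexVal c) := rfl
    rw [this, ih (0 * 16 + pvHexVal c)]
    simp [List.length_cons]
    ring

theorem pvPosSum_eq (p : List Char) : ∀ (k j : Nat) (a : Int), j + p.length = k →
    (p.zipIdx j).foldl
      (fun acc ci => acc + pvHexVal ci.1 * (2 : Int) ^ (4 * (k - 1 - ci.2))) a
    = a + pvHorner p 0 := by
  induction p with
  | nil => intro k j a _; simp [pvHorner]
  | cons c rest ih =>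
    intro k j a hk
    have hkj : k - 1 - j = rest.length := by simp at hk; omega
    rw [List.zipIdx_cons, List.foldl_cons]
    rw [ih k (j + 1) _ (by simp at hk ⊢; omega)]
    have hpow : (2 : Int) ^ (4 * (k - 1 - j)) = 16 ^ rest.length := by
      rw [hkj, pow_mul]; norm_num
    have hH : pvHorner (c :: rest) 0 = pvHexVal c * 16 ^ rest.length + pvHorner rest 0 := by
      show pvHorner rest (0 * 16 + pvHexVal c) = _
      rw [pvHorner_lin rest (0 * 16 + pvHexVal c)]; ring
    rw [hpow, hH]; ring

theorem pvTake_takeWhile (l : List Char) :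
    l.take ((l.takeWhile pvOkB).length) = l.takeWhile pvOkB := by
  induction l with
  | nil => simp
  | cons c rest ih =>
    by_cases h : pvOkB c = true
    · simp [List.takeWhile, h, ih]
    · simp [List.takeWhile, h]

-- ===== VERDICT (by name: the statement is the Claim_ definition above) =====
theorem get_chunk_size_from_header_spec : Claim_equal_get_chunk_size_from_header := by
  intro s _
  unfold Spec_get_chunk_size_from_header get_chunk_size_from_header get_chunk_size_from_header_alt
  have hk : pvFindK 0 s.toList = (s.toList.takeWhile pvOkB).length := by
    rw [pvFindK_eq]; simp
  simp only [hk, pvTake_takeWhile, pvLoopA_eq]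
  rw [pvPosSum_eq _ _ 0 0 (by simp)]
  simp
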